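-- pv_equiv track=rewrite | github.com/nilwyh/python-monasca | monasca/common/alarm_expr_calculator.py | calc_logic
-- ===== SOURCE A (Python) =====
-- def calc_logic(logic_operator, subs):
--     """Calc overall state of an alarm expression.
--
--     'OK' means False;
--     'ALARM' means True;
--     'UNDETERMINED' means either True or False.
--     """
--     if logic_operator == 'AND':
--         state = 'ALARM'
--         for o in subs:
--             if o == 'OK':
--                 return 'OK'
--             elif o == 'UNDETERMINED':
--                 state = 'UNDETERMINED'
--         return state
--     elif logic_operator == 'OR':
--         state = 'OK'
--         for o in subs:
--             if o == 'ALARM':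
--                 return 'ALARM'
--             elif o == 'UNDETERMINED':
--                 state = 'UNDETERMINED'
--         return state
--     else:
--         return 'UNDETERMINED'
-- ===== SOURCE B (Python) =====
-- def calc_logic(logic_operator, subs):
--     """Calc overall state of an alarm expression via priority-ordered membership tests."""
--     if logic_operator == 'AND':
--         if 'OK' in subs:
--             return 'OK'
--         if 'UNDETERMINED' in subs:
--             return 'UNDETERMINED'
--         return 'ALARM'
--     if logic_operator == 'OR':
--         if 'ALARM' in subs:
--             return 'ALARM'
--         if 'UNDETERMINED' in subs:
--             return 'UNDETERMINED'
--         return 'OK'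
--     return 'UNDETERMINED'
-- ===== Notes on version B (the rewrite author's own statement) =====
-- stated objective: simpler
-- what changed: Replaced the stateful accumulator loop with priority-ordered membership tests (short-circuit value first, then UNDETERMINED, else the operator's identity).
import Mathlib
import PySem

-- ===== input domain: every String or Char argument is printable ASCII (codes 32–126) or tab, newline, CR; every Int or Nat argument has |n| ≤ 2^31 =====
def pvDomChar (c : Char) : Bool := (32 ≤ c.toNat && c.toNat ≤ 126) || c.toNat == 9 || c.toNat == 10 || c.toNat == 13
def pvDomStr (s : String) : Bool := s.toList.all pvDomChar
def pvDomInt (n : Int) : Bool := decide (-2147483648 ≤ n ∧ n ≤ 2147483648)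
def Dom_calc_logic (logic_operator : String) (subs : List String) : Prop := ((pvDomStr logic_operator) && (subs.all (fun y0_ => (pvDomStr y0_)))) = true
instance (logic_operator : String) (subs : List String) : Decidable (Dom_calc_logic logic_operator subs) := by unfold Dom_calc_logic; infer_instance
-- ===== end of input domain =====

-- B replaces A's stateful single-pass loops with priority-ordered membership tests (simpler).

-- ===== PORT A =====
-- A's loop threading the 'state' accumulator, with early return, as structural recursion.
def calc_logic_and_loop (subs : List String) (state : String) : String :=
  match subs with
  | [] => state
  | o :: rest =>
    if o = "OK" then "OK"
    else if o = "UNDETERMINED" then calc_logic_and_loop rest "UNDETERMINED"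
    else calc_logic_and_loop rest state

def calc_logic_or_loop (subs : List String) (state : String) : String :=
  match subs with
  | [] => state
  | o :: rest =>
    if o = "ALARM" then "ALARM"
    else if o = "UNDETERMINED" then calc_logic_or_loop rest "UNDETERMINED"
    else calc_logic_or_loop rest state

def calc_logic (logic_operator : String) (subs : List String) : String :=
  if logic_operator = "AND" then calc_logic_and_loop subs "ALARM"
  else if logic_operator = "OR" then calc_logic_or_loop subs "OK"
  else "UNDETERMINED"

-- ===== PORT B =====
def calc_logic_alt (logic_operator : String) (subs : List String) : String :=
  if logic_operator = "AND" then
    if "OK" ∈ subs then "OK"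
    else if "UNDETERMINED" ∈ subs then "UNDETERMINED"
    else "ALARM"
  else if logic_operator = "OR" then
    if "ALARM" ∈ subs then "ALARM"
    else if "UNDETERMINED" ∈ subs then "UNDETERMINED"
    else "OK"
  else "UNDETERMINED"

-- ===== PRECONDITION & SPEC =====
def Spec_calc_logic (logic_operator : String) (subs : List String) (out : String) : Prop := out = calc_logic_alt logic_operator subs
instance (logic_operator : String) (subs : List String) (out : String) : Decidable (Spec_calc_logic logic_operator subs out) := by unfold Spec_calc_logic; infer_instance

-- ===== CLAIM (what is proved, stated in full; the proofs are below) =====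
def Claim_equal_calc_logic : Prop := ∀ (logic_operator : String) (subs : List String), Dom_calc_logic logic_operator subs → Spec_calc_logic logic_operator subs (calc_logic logic_operator subs)

-- ===== LEMMAS AND PROOFS =====
theorem and_loop_eq (subs : List String) (state : String) (hs : state = "ALARM" ∨ state = "UNDETERMINED") :
    calc_logic_and_loop subs state =
      (if "OK" ∈ subs then "OK" else if "UNDETERMINED" ∈ subs then "UNDETERMINED"
       else state) := by
  induction subs generalizing state with
  | nil => simp [calc_logic_and_loop]
  | cons o rest ih =>
    simp only [calc_logic_and_loop, List.mem_cons]
    by_cases h1 : o = "OK"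
    · simp [h1]
    · by_cases h2 : o = "UNDETERMINED"
      · subst h2
        rw [if_neg h1, if_pos rfl, ih _ (Or.inr rfl)]
        by_cases h3 : "OK" ∈ rest <;> simp [h1, h3]
      · rw [if_neg h1, if_neg h2, ih _ hs]
        have hok : ("OK" = o ∨ "OK" ∈ rest) ↔ "OK" ∈ rest := by
          constructor
          · rintro (rfl | h) ; exact absurd rfl h1; exact h
          · exact Or.inr
        have hu : ("UNDETERMINED" = o ∨ "UNDETERMINED" ∈ rest) ↔ "UNDETERMINED" ∈ rest := by
          constructor
          · rintro (rfl | h) ; exact absurd rfl h2; exact h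
          · exact Or.inr
        simp only [hok, hu]

theorem or_loop_eq (subs : List String) (state : String) (hs : state = "OK" ∨ state = "UNDETERMINED") :
    calc_logic_or_loop subs state =
      (if "ALARM" ∈ subs then "ALARM" else if "UNDETERMINED" ∈ subs then "UNDETERMINED"
       else state) := by
  induction subs generalizing state with
  | nil => simp [calc_logic_or_loop]
  | cons o rest ih =>
    simp only [calc_logic_or_loop, List.mem_cons]
    by_cases h1 : o = "ALARM"
    · simp [h1]
    · by_cases h2 : o = "UNDETERMINED"
      · subst h2
        rw [if_neg h1, if_pos rfl, ih _ (Or.inr rfl)]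
        by_cases h3 : "ALARM" ∈ rest <;> simp [h1, h3]
      · rw [if_neg h1, if_neg h2, ih _ hs]
        have hok : ("ALARM" = o ∨ "ALARM" ∈ rest) ↔ "ALARM" ∈ rest := by
          constructor
          · rintro (rfl | h) ; exact absurd rfl h1; exact h
          · exact Or.inr
        have hu : ("UNDETERMINED" = o ∨ "UNDETERMINED" ∈ rest) ↔ "UNDETERMINED" ∈ rest := by
          constructor
          · rintro (rfl | h) ; exact absurd rfl h2; exact h
          · exact Or.inr
        simp only [hok, hu]

-- ===== VERDICT (by name: the statement is the Claim_ definition above) =====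
theorem calc_logic_spec : Claim_equal_calc_logic := by
  intro lop subs _
  unfold Spec_calc_logic calc_logic calc_logic_alt
  by_cases h1 : lop = "AND"
  · simp only [h1, if_pos rfl]
    exact and_loop_eq subs "ALARM" (Or.inl rfl)
  · by_cases h2 : lop = "OR"
    · simp only [if_neg h1, h2, if_pos rfl]
      exact or_loop_eq subs "OK" (Or.inl rfl)
    · simp [h1, h2]
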